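/-
  THE CONTRACTS OF THE SANITIZER'S RUNTIME, as the unit statements use them. The `Spec`s and the fast-path form of the eight small
  check routines are Asan/Runtime.lean's and Asan/Check.lean's (THE LEAN SPEC IS THE CONTRACT: design/CONTRACTS.md entries 1–3, 5–7,
  12, 16, 19–21, 35, 38, 69–72); here: the runtime record of a program on the base image (`runtime ctor table descs`). The frame sizes as `vspec` rewrite rules and the literal
  footprints of `arena_poison` / `arena_unpoison` are those of the shared package (ProgX/Spec/Runtime.lean), re-exported.

      __asan_{load,store}{1,2,4,8}_noabort     NO `Spec`: the statement of each is `Asan.SmallCheck Lay μ WayInv (CodeOK u₀) clob K entry`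
                                               with clob = [rax, rdx] (K = 1), [rax, rcx, rdx] (K = 2, 4, 8)
      __asan_{load,store}16_noabort            `Asan.check16Spec`       __asan_storeN_noabort   `Asan.checkNSpec`
      range_bad                                `Asan.rangeBadSpec`
      arena_unpoison / arena_poison            `Asan.arenaUnpoisonSpec` / `Asan.arenaPoisonSpec`
      __asan_register_globals / _sub_I_65535_1 / run_ctors      `Asan.registerGlobalsSpec rt` / `Asan.ctorSpec rt` / `Asan.runCtorsSpec rt`
      __asan_report                            NO UNIT: it is never called in a proved run ("rip ≠ L.report at every step" IS the
                                               theorem); nothing is proved about its body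
-/
import ProgX.Base.Spec.Basic
import ProgX.Spec.Runtime
namespace ProgX.Base.Spec
open X86 X86.User Asan

/-- **The runtime's entry points on the base image**, for a program whose constructor `_sub_I_65535_1` stands at `ctor`
(ProgX/Base/Symbols.lean: every field but `ctor` is the same in every program; `.init_array` is the one slot [141000H, 141008H)). -/
def rtSym (ctor : Word) : RtSymbols := ProgX.Base.symbols.rt ctor

/-- **The runtime record of a program on the base image**: the base's entry points, the program's constructor, and the
descriptor table of the program's registered globals (its generated `Globals.lean`: `table`, `descs`). -/
def runtime (ctor : Word) (table : Nat) (descs : List GlobalDesc) : Runtime := ⟨rtSym ctor, table, descs⟩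

/-- The entry points of the runtime record are the labels (so that a statement may cite either). -/
theorem rtSym_rangeBad (ctor : Word) : (rtSym ctor).rangeBad = L.range_bad.entry := rfl

/-! The `vspec` rewrite rules of the runtime's contracts, and the footprints of `arena_poison` / `arena_unpoison` as literal lists
(NOT `@[vspec]`: use `simp only [arenaPoisonSpec_writes, Asan.shadowSpan] at w_same` after `v_after_call`; written by
setup_temp_free: `arenaPoison_writes`). -/
export ProgX.Spec (rangeBadSpec_frame rangeBadSpec_writes check16Spec_frame check16Spec_writes checkNSpec_frame checkNSpec_writes
  arenaUnpoisonSpec_frame arenaPoisonSpec_frame registerGlobalsSpec_frame ctorSpec_frame runCtorsSpec_frame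
  arenaUnpoisonSpec_writes arenaPoisonSpec_writes)

end ProgX.Base.Spec
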